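-- pv_equiv track=rewrite | github.com/calvinloveland/megarepo | active/dev-tools/full-auto-ci/src/dashboard/__init__.py | _compute_overview_metrics
-- ===== SOURCE A (Python) =====
-- from typing import Any, Dict
--
-- def _compute_overview_metrics(repositories: list[Dict[str, Any]]) -> Dict[str, Any]:
--     passing_statuses = {"completed", "success"}
--     failing_statuses = {"error", "failed"}
--     queued_statuses = {"pending", "queued"}
--     running_statuses = {"running"}
--
--     metrics = {
--         "total": len(repositories),
--         "passing": 0,
--         "failing": 0,
--         "running": 0,
--         "queued": 0,
--         "never": 0,
--     }
--
--     for repo in repositories: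
--         status = (repo.get("latest_status") or "").lower()
--         if not status:
--             metrics["never"] += 1
--             continue
--         if status in passing_statuses:
--             metrics["passing"] += 1
--         elif status in failing_statuses:
--             metrics["failing"] += 1
--         elif status in running_statuses:
--             metrics["running"] += 1
--         elif status in queued_statuses:
--             metrics["queued"] += 1
--         else:
--             metrics["never"] += 1
--
--     return metrics
-- ===== SOURCE B (Python) =====
-- from collections import Counter
--
--
-- def _compute_overview_metrics(repositories):
--     c = Counter((repo.get("latest_status") or "").lower() for repo in repositories)
--     total = len(repositories)
--     passing = c["completed"] + c["success"]
--     failing = c["error"] + c["failed"]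
--     running = c["running"]
--     queued = c["pending"] + c["queued"]
--     return {
--         "total": total,
--         "passing": passing,
--         "failing": failing,
--         "running": running,
--         "queued": queued,
--         "never": total - passing - failing - running - queued,
--     }
-- ===== Notes on version B (the rewrite author's own statement) =====
-- stated objective: idiomatic
-- what changed: Replaces A's dict-mutating six-way branch loop by a collections.Counter over the normalized statuses, assembling the metrics as category-key sums with 'never' obtained by subtraction from the total.
import Mathlib
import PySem

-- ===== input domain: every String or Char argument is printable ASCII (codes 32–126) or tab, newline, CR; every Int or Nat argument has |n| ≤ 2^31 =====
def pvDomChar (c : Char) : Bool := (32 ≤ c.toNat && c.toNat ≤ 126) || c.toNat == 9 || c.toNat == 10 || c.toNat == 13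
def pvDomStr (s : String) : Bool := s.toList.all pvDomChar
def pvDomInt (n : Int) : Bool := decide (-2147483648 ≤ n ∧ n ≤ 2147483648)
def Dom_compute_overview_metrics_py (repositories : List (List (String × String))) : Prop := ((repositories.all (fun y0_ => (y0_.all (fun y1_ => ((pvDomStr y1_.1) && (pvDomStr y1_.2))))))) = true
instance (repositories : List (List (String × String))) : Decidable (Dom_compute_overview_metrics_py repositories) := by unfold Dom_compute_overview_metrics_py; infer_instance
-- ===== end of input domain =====

-- B replaces A's dict-mutating branch loop by one Counter over the normalized statuses plus
-- category sums, deriving "never" by subtraction (objective: idiomatic, same cost).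

-- ===== PORT A =====
-- (repo.get("latest_status") or "") : a missing key and an empty value both normalize to ""
def pvStatusA (repo : List (String × String)) : String :=
  PySem.Str.lower ((repo.lookup "latest_status").getD "")

def compute_overview_metrics_py (repositories : List (List (String × String))) : List (String × Int) :=
  let metrics : PySem.Dict String Int := PySem.Dict.ofList
    [("total", (repositories.length : Int)), ("passing", 0), ("failing", 0),
     ("running", 0), ("queued", 0), ("never", 0)]
  let metrics := repositories.foldl (fun m repo =>
    let status := pvStatusA repo
    if status == "" then m.modify "never" 0 (· + 1)
    else if status == "completed" || status == "success" then m.modify "passing" 0 (· + 1)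
    else if status == "error" || status == "failed" then m.modify "failing" 0 (· + 1)
    else if status == "running" then m.modify "running" 0 (· + 1)
    else if status == "pending" || status == "queued" then m.modify "queued" 0 (· + 1)
    else m.modify "never" 0 (· + 1)) metrics
  metrics.items

-- ===== PORT B =====
def compute_overview_metrics_py_alt (repositories : List (List (String × String))) : List (String × Int) :=
  let c : PySem.Dict String Int := PySem.Dict.counter
    (repositories.map (fun repo => PySem.Str.lower ((repo.lookup "latest_status").getD "")))
  let total : Int := repositories.length
  let passing := c.getD "completed" 0 + c.getD "success" 0
  let failing := c.getD "error" 0 + c.getD "failed" 0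
  let running := c.getD "running" 0
  let queued := c.getD "pending" 0 + c.getD "queued" 0
  [("total", total), ("passing", passing), ("failing", failing),
   ("running", running), ("queued", queued),
   ("never", total - passing - failing - running - queued)]

-- ===== PRECONDITION & SPEC =====
def Spec_compute_overview_metrics_py (repositories : List (List (String × String))) (out : List (String × Int)) : Prop := out = compute_overview_metrics_py_alt repositories
instance (repositories : List (List (String × String))) (out : List (String × Int)) : Decidable (Spec_compute_overview_metrics_py repositories out) := by unfold Spec_compute_overview_metrics_py; infer_instance

-- ===== CLAIM (what is proved, stated in full; the proofs are below) =====
def Claim_equal_compute_overview_metrics_py : Prop := ∀ (repositories : List (List (String × String))), Dom_compute_overview_metrics_py repositories → Spec_compute_overview_metrics_py repositories (compute_overview_metrics_py repositories)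

-- ===== LEMMAS AND PROOFS =====

def pvPassP (s : String) : Bool := s == "completed" || s == "success"
def pvFailP (s : String) : Bool := s == "error" || s == "failed"
def pvRunP (s : String) : Bool := s == "running"
def pvQueueP (s : String) : Bool := s == "pending" || s == "queued"
def pvNeverP (s : String) : Bool := !(pvPassP s || pvFailP s || pvRunP s || pvQueueP s)

def pvD (t p f r q v : Int) : PySem.Dict String Int :=
  PySem.Dict.ofList [("total", t), ("passing", p), ("failing", f),
                     ("running", r), ("queued", q), ("never", v)]

lemma pvModPass (t p f r q v : Int) : (pvD t p f r q v).modify "passing" 0 (· + 1) = pvD t (p+1) f r q v := rfl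
lemma pvModFail (t p f r q v : Int) : (pvD t p f r q v).modify "failing" 0 (· + 1) = pvD t p (f+1) r q v := rfl
lemma pvModRun (t p f r q v : Int) : (pvD t p f r q v).modify "running" 0 (· + 1) = pvD t p f (r+1) q v := rfl
lemma pvModQueue (t p f r q v : Int) : (pvD t p f r q v).modify "queued" 0 (· + 1) = pvD t p f r (q+1) v := rfl
lemma pvModNever (t p f r q v : Int) : (pvD t p f r q v).modify "never" 0 (· + 1) = pvD t p f r q (v+1) := rfl
lemma pvD_items (t p f r q v : Int) : (pvD t p f r q v).items =
    [("total", t), ("passing", p), ("failing", f), ("running", r), ("queued", q), ("never", v)] := rfl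

lemma pvD_inj {t p f r q v t' p' f' r' q' v' : Int} (h1 : t = t') (h2 : p = p') (h3 : f = f')
    (h4 : r = r') (h5 : q = q') (h6 : v = v') : pvD t p f r q v = pvD t' p' f' r' q' v' := by
  rw [h1, h2, h3, h4, h5, h6]

-- A's loop, characterised: it only adds the five category counts to the initial dict values.
lemma pvFoldA (ms : List (List (String × String))) (t p f r q v : Int) :
    ms.foldl (fun m repo =>
      let status := pvStatusA repo
      if status == "" then m.modify "never" 0 (· + 1)
      else if status == "completed" || status == "success" then m.modify "passing" 0 (· + 1)
      else if status == "error" || status == "failed" then m.modify "failing" 0 (· + 1)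
      else if status == "running" then m.modify "running" 0 (· + 1)
      else if status == "pending" || status == "queued" then m.modify "queued" 0 (· + 1)
      else m.modify "never" 0 (· + 1)) (pvD t p f r q v)
    = pvD t (p + ((ms.map pvStatusA).countP pvPassP : Int))
            (f + ((ms.map pvStatusA).countP pvFailP : Int))
            (r + ((ms.map pvStatusA).countP pvRunP : Int))
            (q + ((ms.map pvStatusA).countP pvQueueP : Int))
            (v + ((ms.map pvStatusA).countP pvNeverP : Int)) := by
  induction ms generalizing t p f r q v with
  | nil => simp [List.countP]
  | cons repo rest ih =>
    simp only [List.foldl_cons, List.map_cons, List.countP_cons]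
    by_cases h0 : pvStatusA repo = ""
    · have h0' : (pvStatusA repo == "") = true := by simp [h0]
      have hn : pvNeverP (pvStatusA repo) = true := by simp [h0, pvNeverP, pvPassP, pvFailP, pvRunP, pvQueueP]
      have hp : pvPassP (pvStatusA repo) = false := by simp [h0, pvPassP]
      have hf : pvFailP (pvStatusA repo) = false := by simp [h0, pvFailP]
      have hr : pvRunP (pvStatusA repo) = false := by simp [h0, pvRunP]
      have hq : pvQueueP (pvStatusA repo) = false := by simp [h0, pvQueueP]
      rw [if_pos h0', pvModNever, ih]
      exact pvD_inj rfl (by simp [hp]) (by simp [hf]) (by simp [hr]) (by simp [hq]) (by simp [hn]; ring)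
    · have h0' : ¬ ((pvStatusA repo == "") = true) := by simp [h0]
      by_cases hp : pvPassP (pvStatusA repo) = true
      · have hp' : (pvStatusA repo == "completed" || pvStatusA repo == "success") = true := hp
        have hf : pvFailP (pvStatusA repo) = false := by revert hp; simp [pvPassP, pvFailP]; rintro (h|h) <;> simp [h]
        have hr : pvRunP (pvStatusA repo) = false := by revert hp; simp [pvPassP, pvRunP]; rintro (h|h) <;> simp [h]
        have hq : pvQueueP (pvStatusA repo) = false := by revert hp; simp [pvPassP, pvQueueP]; rintro (h|h) <;> simp [h]
        have hn : pvNeverP (pvStatusA repo) = false := by simp [pvNeverP, hp]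
        rw [if_neg h0', if_pos hp', pvModPass, ih]
        exact pvD_inj rfl (by simp [hp]; ring) (by simp [hf]) (by simp [hr]) (by simp [hq]) (by simp [hn])
      · have hp' : ¬ ((pvStatusA repo == "completed" || pvStatusA repo == "success") = true) := hp
        by_cases hf : pvFailP (pvStatusA repo) = true
        · have hf' : (pvStatusA repo == "error" || pvStatusA repo == "failed") = true := hf
          have hr : pvRunP (pvStatusA repo) = false := by revert hf; simp [pvFailP, pvRunP]; rintro (h|h) <;> simp [h]
          have hq : pvQueueP (pvStatusA repo) = false := by revert hf; simp [pvFailP, pvQueueP]; rintro (h|h) <;> simp [h]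
          have hn : pvNeverP (pvStatusA repo) = false := by simp [pvNeverP, hf]
          rw [if_neg h0', if_neg hp', if_pos hf', pvModFail, ih]
          exact pvD_inj rfl (by simp [hp]) (by simp [hf]; ring) (by simp [hr]) (by simp [hq]) (by simp [hn])
        · have hf' : ¬ ((pvStatusA repo == "error" || pvStatusA repo == "failed") = true) := hf
          by_cases hr : pvRunP (pvStatusA repo) = true
          · have hr' : (pvStatusA repo == "running") = true := hr
            have hq : pvQueueP (pvStatusA repo) = false := by revert hr; simp [pvRunP, pvQueueP]; intro h; simp [h]
            have hn : pvNeverP (pvStatusA repo) = false := by simp [pvNeverP, hr]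
            rw [if_neg h0', if_neg hp', if_neg hf', if_pos hr', pvModRun, ih]
            exact pvD_inj rfl (by simp [hp]) (by simp [hf]) (by simp [hr]; ring) (by simp [hq]) (by simp [hn])
          · have hr' : ¬ ((pvStatusA repo == "running") = true) := hr
            by_cases hq : pvQueueP (pvStatusA repo) = true
            · have hq' : (pvStatusA repo == "pending" || pvStatusA repo == "queued") = true := hq
              have hn : pvNeverP (pvStatusA repo) = false := by simp [pvNeverP, hq]
              rw [if_neg h0', if_neg hp', if_neg hf', if_neg hr', if_pos hq', pvModQueue, ih]
              exact pvD_inj rfl (by simp [hp]) (by simp [hf]) (by simp [hr]) (by simp [hq]; ring) (by simp [hn])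
            · have hq' : ¬ ((pvStatusA repo == "pending" || pvStatusA repo == "queued") = true) := hq
              have hn : pvNeverP (pvStatusA repo) = true := by simp [pvNeverP, hp, hf, hr, hq]
              rw [if_neg h0', if_neg hp', if_neg hf', if_neg hr', if_neg hq', pvModNever, ih]
              exact pvD_inj rfl (by simp [hp]) (by simp [hf]) (by simp [hr]) (by simp [hq]) (by simp [hn]; ring)

-- count of two distinct values = countP of their disjunction
lemma pvCountPair (a b : String) (hab : a ≠ b) (l : List String) :
    l.countP (fun s => s == a || s == b) = l.count a + l.count b := by
  induction l with
  | nil => simp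
  | cons x xs ih =>
    by_cases hxa : x = a <;> by_cases hxb : x = b <;>
      simp [hxa, hxb, ih, hab, Ne.symm hab] <;> omega

-- the five categories partition the list
lemma pvPartition (l : List String) :
    l.countP pvPassP + l.countP pvFailP + l.countP pvRunP + l.countP pvQueueP + l.countP pvNeverP = l.length := by
  induction l with
  | nil => simp
  | cons x xs ih =>
    simp only [List.countP_cons, List.length_cons]
    by_cases hp : pvPassP x = true
    · have hf : pvFailP x = false := by revert hp; simp [pvPassP, pvFailP]; rintro (h|h) <;> simp [h]
      have hr : pvRunP x = false := by revert hp; simp [pvPassP, pvRunP]; rintro (h|h) <;> simp [h]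
      have hq : pvQueueP x = false := by revert hp; simp [pvPassP, pvQueueP]; rintro (h|h) <;> simp [h]
      have hn : pvNeverP x = false := by simp [pvNeverP, hp]
      simp [hp, hf, hr, hq, hn]; omega
    · have hp' : pvPassP x = false := by simpa using hp
      by_cases hf : pvFailP x = true
      · have hr : pvRunP x = false := by revert hf; simp [pvFailP, pvRunP]; rintro (h|h) <;> simp [h]
        have hq : pvQueueP x = false := by revert hf; simp [pvFailP, pvQueueP]; rintro (h|h) <;> simp [h]
        have hn : pvNeverP x = false := by simp [pvNeverP, hf]
        simp [hp', hf, hr, hq, hn]; omega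
      · have hf' : pvFailP x = false := by simpa using hf
        by_cases hr : pvRunP x = true
        · have hq : pvQueueP x = false := by revert hr; simp [pvRunP, pvQueueP]; intro h; simp [h]
          have hn : pvNeverP x = false := by simp [pvNeverP, hr]
          simp [hp', hf', hr, hq, hn]; omega
        · have hr' : pvRunP x = false := by simpa using hr
          by_cases hq : pvQueueP x = true
          · have hn : pvNeverP x = false := by simp [pvNeverP, hq]
            simp [hp', hf', hr', hq, hn]; omega
          · have hq' : pvQueueP x = false := by simpa using hq
            have hn : pvNeverP x = true := by simp [pvNeverP, hp', hf', hr', hq']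
            simp [hp', hf', hr', hq', hn]; omega

-- ===== VERDICT (by name: the statement is the Claim_ definition above) =====
theorem compute_overview_metrics_py_spec : Claim_equal_compute_overview_metrics_py := by
  intro repos _
  unfold Spec_compute_overview_metrics_py
  simp only [compute_overview_metrics_py, compute_overview_metrics_py_alt]
  rw [show (PySem.Dict.ofList [("total", ((repos.length : Int))), ("passing", (0:Int)), ("failing", 0),
     ("running", 0), ("queued", 0), ("never", 0)]) = pvD (repos.length) 0 0 0 0 0 from rfl]
  rw [pvFoldA, pvD_items]
  have hms : (repos.map fun repo => PySem.Str.lower ((repo.lookup "latest_status").getD "")) = repos.map pvStatusA := by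
    simp [pvStatusA]
  rw [hms]
  set ms := repos.map pvStatusA with hdef
  have hlen : ms.length = repos.length := List.length_map _
  have hpart := pvPartition ms
  have hpass : ms.countP pvPassP = ms.count "completed" + ms.count "success" := by
    simpa [pvPassP] using pvCountPair "completed" "success" (by decide) ms
  have hfail : ms.countP pvFailP = ms.count "error" + ms.count "failed" := by
    simpa [pvFailP] using pvCountPair "error" "failed" (by decide) ms
  have hqueue : ms.countP pvQueueP = ms.count "pending" + ms.count "queued" := by
    simpa [pvQueueP] using pvCountPair "pending" "queued" (by decide) ms
  have hrun : ms.countP pvRunP = ms.count "running" := by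
    simp only [List.count]; rfl
  simp only [PySem.Dict.getD_counter, List.cons.injEq, Prod.mk.injEq, true_and, and_true]
  omega
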